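-- pv_equiv track=rewrite | github.com/miliar/Code_Jam_Webscraper | solutions_python/Problem_96/1727.py | ValidTriplet
-- ===== SOURCE A (Python) =====
-- import math
--
-- def IsSurprising(scorelist):
--     if math.fabs(scorelist[0] - scorelist[2]) >= 2:
--         return True
--     return False
--
-- def ValidTriplet(scores, p, S):
--
--     # Scan for non surprising
--     for scorelist in scores:
--         if scorelist[2] >= p and IsSurprising(scorelist) == False:
--             return scorelist
--
--     # Scan for surprising
--     for scorelist in scores:
--         if scorelist[2] >= p and IsSurprising(scorelist) == True and S > 0:
--             return scorelist
--
--     return None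
-- ===== SOURCE B (Python) =====
-- def ValidTriplet(scores, p, S):
--     candidate = None
--     for sl in scores:
--         if sl[2] >= p:
--             if abs(sl[0] - sl[2]) < 2:
--                 return sl
--             if candidate is None:
--                 candidate = sl
--     return candidate if S > 0 else None
-- ===== Notes on version B (the rewrite author's own statement) =====
-- stated objective: simpler
-- what changed: Replaces A's two full scans (first for non-surprising, then for surprising) by one single pass that returns a qualifying non-surprising row immediately and remembers the first qualifying surprising row as a candidate, returned after the loop only when S > 0.
-- outside the precondition, e.g. on ValidTriplet([[10, 10, 10], [0]], 0, 0): A returns [10, 10, 10], B returns [10, 10, 10]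
import Mathlib
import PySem

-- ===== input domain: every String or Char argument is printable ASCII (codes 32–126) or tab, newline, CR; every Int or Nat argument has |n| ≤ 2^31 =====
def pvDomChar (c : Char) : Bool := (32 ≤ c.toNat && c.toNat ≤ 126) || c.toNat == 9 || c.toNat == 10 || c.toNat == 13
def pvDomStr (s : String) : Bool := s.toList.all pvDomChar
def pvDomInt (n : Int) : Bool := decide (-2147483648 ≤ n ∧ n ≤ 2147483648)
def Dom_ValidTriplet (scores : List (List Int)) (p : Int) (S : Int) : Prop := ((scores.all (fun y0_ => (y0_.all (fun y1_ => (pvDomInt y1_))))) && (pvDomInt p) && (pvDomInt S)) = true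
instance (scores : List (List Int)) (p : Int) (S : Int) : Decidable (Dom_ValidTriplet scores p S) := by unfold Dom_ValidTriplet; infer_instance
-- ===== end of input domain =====

-- B replaces A's two full scans by one single pass keeping the first surprising candidate (objective: simpler).

-- ===== PORT A =====
-- scorelist[i]; Pre_ guarantees every row has length ≥ 3, so the index is in range there
def pvIdx (sl : List Int) (i : Int) : Int := (PySem.List.pyGet? sl i).getD 0

-- IsSurprising: math.fabs(sl[0] - sl[2]) >= 2 (exact on |int| ≤ 2^31: the difference is exact in a double)
def pyIsSurprising (sl : List Int) : Bool := if 2 ≤ |pvIdx sl 0 - pvIdx sl 2| then true else false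

-- first loop of A: scan for non-surprising
def pvScan1 (scores : List (List Int)) (p : Int) : Option (List Int) :=
  match scores with
  | [] => none
  | sl :: rest =>
    if p ≤ pvIdx sl 2 ∧ pyIsSurprising sl = false then some sl else pvScan1 rest p

-- second loop of A: scan for surprising (S > 0 inside the condition, as in A)
def pvScan2 (scores : List (List Int)) (p : Int) (S : Int) : Option (List Int) :=
  match scores with
  | [] => none
  | sl :: rest =>
    if p ≤ pvIdx sl 2 ∧ pyIsSurprising sl = true ∧ S > 0 then some sl else pvScan2 rest p S

def ValidTriplet (scores : List (List Int)) (p : Int) (S : Int) : Option (List Int) :=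
  match pvScan1 scores p with
  | some sl => some sl
  | none => pvScan2 scores p S

-- ===== PORT B =====
-- single pass; `cand` is the stored first surprising qualifying row (None until set)
def pvAltGo (scores : List (List Int)) (p : Int) (S : Int) (cand : Option (List Int)) : Option (List Int) :=
  match scores with
  | [] => if S > 0 then cand else none
  | sl :: rest =>
    if p ≤ pvIdx sl 2 then
      if |pvIdx sl 0 - pvIdx sl 2| < 2 then some sl
      else pvAltGo rest p S (if cand.isNone then some sl else cand)
    else pvAltGo rest p S cand

def ValidTriplet_alt (scores : List (List Int)) (p : Int) (S : Int) : Option (List Int) :=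
  pvAltGo scores p S none

-- ===== PRECONDITION & SPEC =====
-- Pre_ excludes score lists containing a row shorter than 3 entries, on which A raises IndexError
-- (unless an earlier non-surprising qualifying row returns first — then both programs agree anyway).
def Pre_ValidTriplet (scores : List (List Int)) (p : Int) (S : Int) : Prop :=
  ∀ sl ∈ scores, 3 ≤ sl.length
instance (scores : List (List Int)) (p : Int) (S : Int) : Decidable (Pre_ValidTriplet scores p S) := by
  unfold Pre_ValidTriplet; infer_instance

def pvWitness_ValidTriplet : List (List Int) × Int × Int := ([[1, 2, 3], [0, 5, 10]], 3, 1)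

def Spec_ValidTriplet (scores : List (List Int)) (p : Int) (S : Int) (out : Option (List Int)) : Prop := out = ValidTriplet_alt scores p S
instance (scores : List (List Int)) (p : Int) (S : Int) (out : Option (List Int)) : Decidable (Spec_ValidTriplet scores p S out) := by unfold Spec_ValidTriplet; infer_instance

-- ===== CLAIM (what is proved, stated in full; the proofs are below) =====
def Claim_equal_ValidTriplet : Prop := ∀ (scores : List (List Int)) (p : Int) (S : Int), Dom_ValidTriplet scores p S → Pre_ValidTriplet scores p S → Spec_ValidTriplet scores p S (ValidTriplet scores p S)

-- ===== LEMMAS AND PROOFS =====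

-- A's second scan is none whenever S ≤ 0
theorem pvScan2_nonpos (scores : List (List Int)) (p : Int) (S : Int) (h : ¬ S > 0) :
    pvScan2 scores p S = none := by
  induction scores with
  | nil => rfl
  | cons sl rest ih =>
    simp only [pvScan2]
    rw [if_neg (by tauto)]
    exact ih

-- once a candidate is stored, B returns A's first-scan result, else the candidate gated by S
theorem pvAltGo_some (scores : List (List Int)) (p : Int) (S : Int) (c : List Int) :
    pvAltGo scores p S (some c) =
      match pvScan1 scores p with
      | some sl => some sl
      | none => if S > 0 then some c else none := by
  induction scores with
  | nil => rfl
  | cons sl rest ih =>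
    simp only [pvAltGo, pvScan1]
    by_cases hq : p ≤ pvIdx sl 2
    · rw [if_pos hq]
      by_cases hs : |pvIdx sl 0 - pvIdx sl 2| < 2
      · have hsurp : pyIsSurprising sl = false := by simp [pyIsSurprising]; omega
        rw [if_pos hs, if_pos ⟨hq, hsurp⟩]
      · have hsurp : pyIsSurprising sl = true := by simp [pyIsSurprising]; omega
        have hcond : ¬ (p ≤ pvIdx sl 2 ∧ pyIsSurprising sl = false) := by simp [hsurp]
        rw [if_neg hs, if_neg hcond]
        simpa using ih
    · rw [if_neg hq, if_neg (by tauto)]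
      exact ih

-- main invariant: B with empty candidate equals A's two-scan result
theorem pvAltGo_none (scores : List (List Int)) (p : Int) (S : Int) :
    pvAltGo scores p S none =
      match pvScan1 scores p with
      | some sl => some sl
      | none => pvScan2 scores p S := by
  induction scores with
  | nil => simp [pvAltGo, pvScan1, pvScan2]
  | cons sl rest ih =>
    simp only [pvAltGo, pvScan1, pvScan2]
    by_cases hq : p ≤ pvIdx sl 2
    · rw [if_pos hq]
      by_cases hs : |pvIdx sl 0 - pvIdx sl 2| < 2
      · have hsurp : pyIsSurprising sl = false := by simp [pyIsSurprising]; omega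
        rw [if_pos hs, if_pos ⟨hq, hsurp⟩]
      · have hsurp : pyIsSurprising sl = true := by simp [pyIsSurprising]; omega
        have hcond : ¬ (p ≤ pvIdx sl 2 ∧ pyIsSurprising sl = false) := by simp [hsurp]
        rw [if_neg hs, if_neg hcond]
        simp only [Option.isNone_none, if_true]
        rw [pvAltGo_some]
        by_cases hS : S > 0
        · have hc2 : p ≤ pvIdx sl 2 ∧ pyIsSurprising sl = true ∧ S > 0 := ⟨hq, hsurp, hS⟩
          rw [if_pos hS, if_pos hc2]
        · rw [if_neg hS, pvScan2_nonpos rest p S hS]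
          cases pvScan1 rest p <;> simp [hS]
    · rw [if_neg hq, if_neg (by tauto), if_neg (by tauto)]
      exact ih

-- ===== VERDICT (by name: the statement is the Claim_ definition above) =====
theorem ValidTriplet_spec : Claim_equal_ValidTriplet := by
  intro scores p S _ _
  unfold Spec_ValidTriplet ValidTriplet ValidTriplet_alt
  rw [pvAltGo_none]
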